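-- pv_equiv track=rewrite | github.com/vinodsesetti/xyz | cost_analysys.py | get_productivity_upto_month
-- ===== SOURCE A (Python) =====
-- def get_productivity_upto_month(prod_for_month={},all_month_names = []):
--     prod_upto_month = {}
--     for k, v in prod_for_month.items():
--         prod_upto_month[k] = {'total':0}
--         current_val = 0
--         for i in all_month_names:
--             prod_upto_month[k][i] = current_val + v.get(i, 0)
--             prod_upto_month[k]['total']+= current_val + v.get(i, 0)
--             current_val += v.get(i, 0)
--     return prod_upto_month
-- ===== SOURCE B (Python) =====
-- def _month_table(v, months):
--     # value for a month = sum of the per-month amounts seen so far, recomputed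
--     # from the growing 'seen' list each time; no running accumulator
--     d = {'total': 0}
--     seen = []
--     for m in months:
--         seen.append(v.get(m, 0))
--         p = sum(seen)
--         d[m] = p
--         d['total'] += p
--     return d
--
-- def get_productivity_upto_month(prod_for_month={}, all_month_names=[]):
--     return {k: _month_table(v, all_month_names) for k, v in prod_for_month.items()}
-- ===== Notes on version B (the rewrite author's own statement) =====
-- stated objective: alternative
-- what changed: B drops A's running current_val accumulator entirely: each month's value is recomputed from scratch as sum(seen) over the growing list of per-month amounts seen so far, and the outer loop becomes a dict comprehension over a helper; stateless values at quadratic cost.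
import Mathlib
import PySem

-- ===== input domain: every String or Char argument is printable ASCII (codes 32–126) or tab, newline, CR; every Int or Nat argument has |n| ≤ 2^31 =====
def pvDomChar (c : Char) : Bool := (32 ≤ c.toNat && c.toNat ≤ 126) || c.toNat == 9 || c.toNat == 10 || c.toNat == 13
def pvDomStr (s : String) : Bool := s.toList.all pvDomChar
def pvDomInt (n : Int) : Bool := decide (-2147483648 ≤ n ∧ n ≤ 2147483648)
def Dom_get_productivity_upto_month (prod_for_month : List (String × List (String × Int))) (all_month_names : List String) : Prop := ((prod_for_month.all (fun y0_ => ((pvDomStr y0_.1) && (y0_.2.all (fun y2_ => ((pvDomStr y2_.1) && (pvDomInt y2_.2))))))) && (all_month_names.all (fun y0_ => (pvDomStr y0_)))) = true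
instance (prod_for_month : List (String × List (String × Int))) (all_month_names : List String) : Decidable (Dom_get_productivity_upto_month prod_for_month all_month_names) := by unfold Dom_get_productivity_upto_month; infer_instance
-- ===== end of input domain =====

-- B replaces A's running accumulator with per-month recomputation: each value is the
-- sum of the list of amounts seen so far (stateless values, quadratic work); alternative.
-- ===== PORT A =====
def get_productivity_upto_month (prod_for_month : List (String × List (String × Int))) (all_month_names : List String) : List (String × List (String × Int)) :=
  (prod_for_month.foldl (fun (acc : PySem.Dict String (List (String × Int))) kv =>
      let v : PySem.Dict String Int := PySem.Dict.ofList kv.2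
      let st := all_month_names.foldl (fun (st : PySem.Dict String Int × Int) i =>
          let t := st.2 + v.getD i 0
          let d := st.1.insert i t
          let d := d.insert "total" (d.getD "total" 0 + t)
          (d, t))
        (PySem.Dict.ofList [("total", (0 : Int))], 0)
      acc.insert kv.1 st.1.items)
    PySem.Dict.empty).items

-- ===== PORT B =====
-- helper _month_table from Source B
def pvMonthTable (v : PySem.Dict String Int) (months : List String) : List (String × Int) :=
  (months.foldl (fun (st : PySem.Dict String Int × List Int) m =>
      let seen := st.2 ++ [v.getD m 0]
      let p := seen.foldl (fun s x => s + x) 0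
      let d := st.1.insert m p
      let d := d.insert "total" (d.getD "total" 0 + p)
      (d, seen))
    (PySem.Dict.ofList [("total", (0 : Int))], ([] : List Int))).1.items

def get_productivity_upto_month_alt (prod_for_month : List (String × List (String × Int))) (all_month_names : List String) : List (String × List (String × Int)) :=
  (prod_for_month.foldl (fun (acc : PySem.Dict String (List (String × Int))) kv =>
      acc.insert kv.1 (pvMonthTable (PySem.Dict.ofList kv.2) all_month_names))
    PySem.Dict.empty).items

-- ===== PRECONDITION & SPEC =====
def Spec_get_productivity_upto_month (prod_for_month : List (String × List (String × Int))) (all_month_names : List String) (out : List (String × List (String × Int))) : Prop := out = get_productivity_upto_month_alt prod_for_month all_month_names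
instance (prod_for_month : List (String × List (String × Int))) (all_month_names : List String) (out : List (String × List (String × Int))) : Decidable (Spec_get_productivity_upto_month prod_for_month all_month_names out) := by unfold Spec_get_productivity_upto_month; infer_instance

-- ===== CLAIM =====
def Claim_equal_get_productivity_upto_month : Prop := ∀ (prod_for_month : List (String × List (String × Int))) (all_month_names : List String), Dom_get_productivity_upto_month prod_for_month all_month_names → Spec_get_productivity_upto_month prod_for_month all_month_names (get_productivity_upto_month prod_for_month all_month_names)

-- ===== LEMMAS AND PROOFS =====

-- A's inner fold starting from accumulator c = sum over `seen` equals B's inner fold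
-- carrying the `seen` list.
theorem pvInner_eq (v : PySem.Dict String Int) (ms : List String)
    (d0 : PySem.Dict String Int) (seen : List Int) :
    (ms.foldl (fun (st : PySem.Dict String Int × Int) i =>
        let t := st.2 + v.getD i 0
        let d := st.1.insert i t
        let d := d.insert "total" (d.getD "total" 0 + t)
        (d, t)) (d0, seen.foldl (fun s x => s + x) 0)).1
    = (ms.foldl (fun (st : PySem.Dict String Int × List Int) m =>
        let seen := st.2 ++ [v.getD m 0]
        let p := seen.foldl (fun s x => s + x) 0
        let d := st.1.insert m p
        let d := d.insert "total" (d.getD "total" 0 + p)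
        (d, seen)) (d0, seen)).1 := by
  induction ms generalizing d0 seen with
  | nil => rfl
  | cons m ms ih =>
    simp only [List.foldl]
    have h : (seen ++ [v.getD m 0]).foldl (fun s x => s + x) 0
        = seen.foldl (fun s x => s + x) 0 + v.getD m 0 := by
      simp [List.foldl_append]
    rw [← h]
    exact ih _ (seen ++ [v.getD m 0])

theorem pvInner_eq0 (v : PySem.Dict String Int) (ms : List String)
    (d0 : PySem.Dict String Int) :
    (ms.foldl (fun (st : PySem.Dict String Int × Int) i =>
        let t := st.2 + v.getD i 0
        let d := st.1.insert i t
        let d := d.insert "total" (d.getD "total" 0 + t)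
        (d, t)) (d0, 0)).1
    = (ms.foldl (fun (st : PySem.Dict String Int × List Int) m =>
        let seen := st.2 ++ [v.getD m 0]
        let p := seen.foldl (fun s x => s + x) 0
        let d := st.1.insert m p
        let d := d.insert "total" (d.getD "total" 0 + p)
        (d, seen)) (d0, ([] : List Int))).1 := by
  simpa using pvInner_eq v ms d0 []

-- ===== VERDICT =====
theorem get_productivity_upto_month_spec : Claim_equal_get_productivity_upto_month := by
  intro pfm months _
  unfold Spec_get_productivity_upto_month get_productivity_upto_month get_productivity_upto_month_alt pvMonthTable
  simp only [pvInner_eq0]
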